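-- pv_equiv track=rewrite | github.com/ice-tong/undergraduate | ICS_33/quiz4/q4solution.py | yield_and_skip
-- ===== SOURCE A (Python) =====
-- def yield_and_skip(iterable):
--     i = iter(iterable)
--     try:
--         while True:
--             n = next(i)
--             yield n
--             if type(n) == int:
--                 for _ in range(n):
--                     next(i)
--     except StopIteration:
--         pass
-- ===== SOURCE B (Python) =====
-- def yield_and_skip(iterable):
--     skip = 0
--     for x in iterable:
--         if skip > 0:
--             skip -= 1
--             continue
--         yield x
--         if type(x) == int:
--             skip = x
-- ===== Notes on version B (the rewrite author's own statement) =====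
-- stated objective: simpler
-- what changed: Replaces the while-True/try-except StopIteration with nested next() calls by a plain for-loop that maintains an integer skip counter (decrement-and-continue instead of advancing the iterator explicitly).
import Mathlib
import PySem

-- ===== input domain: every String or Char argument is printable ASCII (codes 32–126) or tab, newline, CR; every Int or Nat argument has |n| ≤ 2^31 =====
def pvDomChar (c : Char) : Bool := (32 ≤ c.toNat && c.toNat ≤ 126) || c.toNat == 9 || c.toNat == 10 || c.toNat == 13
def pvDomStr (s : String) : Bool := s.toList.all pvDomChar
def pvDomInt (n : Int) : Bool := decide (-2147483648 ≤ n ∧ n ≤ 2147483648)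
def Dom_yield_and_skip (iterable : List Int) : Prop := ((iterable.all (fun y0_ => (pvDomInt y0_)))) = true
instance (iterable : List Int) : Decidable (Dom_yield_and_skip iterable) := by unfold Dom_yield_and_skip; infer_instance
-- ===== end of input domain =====

-- B replaces A's while-True/try-except with nested next() calls by a single for-loop with a skip counter; objective: simpler.


-- ===== PORT A =====
-- A: yield n, then advance the iterator n.toNat times ('for _ in range(n): next(i)';
-- range of a negative int is empty, hence toNat; running off the end raises StopIteration,
-- which A catches and stops — List.drop past the end giving [] is exact for that).
def yieldSkipA : List Int → List Int
  | [] => []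
  | x :: xs => x :: yieldSkipA (xs.drop x.toNat)
termination_by l => l.length
decreasing_by simp only [List.length_cons, List.length_drop]; omega

def yield_and_skip (iterable : List Int) : List Int := yieldSkipA iterable

-- ===== PORT B =====
-- B: for-loop with skip counter; skip>0 ⇒ consume, else emit and set skip := x.
def yieldSkipB (skip : Int) : List Int → List Int
  | [] => []
  | x :: xs => if skip > 0 then yieldSkipB (skip - 1) xs else x :: yieldSkipB x xs

def yield_and_skip_alt (iterable : List Int) : List Int := yieldSkipB 0 iterable

-- ===== PRECONDITION & SPEC =====
def Spec_yield_and_skip (iterable : List Int) (out : List Int) : Prop := out = yield_and_skip_alt iterable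
instance (iterable : List Int) (out : List Int) : Decidable (Spec_yield_and_skip iterable out) := by unfold Spec_yield_and_skip; infer_instance

-- ===== CLAIM (what is proved, stated in full; the proofs are below) =====
def Claim_equal_yield_and_skip : Prop := ∀ (iterable : List Int), Dom_yield_and_skip iterable → Spec_yield_and_skip iterable (yield_and_skip iterable)

-- ===== LEMMAS AND PROOFS =====
-- invariant: a pending skip counter s is the same as having dropped s.toNat elements
lemma yieldSkipB_eq_drop (l : List Int) : ∀ s : Int, yieldSkipB s l = yieldSkipA (l.drop s.toNat) := by
  induction l with
  | nil => intro s; rw [yieldSkipB, List.drop_nil, yieldSkipA.eq_1]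
  | cons x xs ih =>
    intro s
    by_cases hs : s > 0
    · have h1 : s.toNat = (s - 1).toNat + 1 := by omega
      rw [yieldSkipB]; simp only [hs, if_true, h1, ih, List.drop_succ_cons]
    · have h0 : s.toNat = 0 := by omega
      rw [yieldSkipB]; simp only [hs, if_false, h0, List.drop_zero, ih]
      rw [yieldSkipA.eq_2]

-- ===== VERDICT (by name: the statement is the Claim_ definition above) =====
theorem yield_and_skip_spec : Claim_equal_yield_and_skip := by
  intro l _
  unfold Spec_yield_and_skip yield_and_skip yield_and_skip_alt
  simp [yieldSkipB_eq_drop]
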